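-- pv_equiv track=rewrite | github.com/e-yc/rosetta | tokenizer_analysis.py | _token_boundaries
-- ===== SOURCE A (Python) =====
-- def _token_boundaries(char_map: list[int]) -> set[int]:
--     """Return set of character positions where token boundaries occur."""
--     boundaries = set()
--     prev = -2
--     for i, t in enumerate(char_map):
--         if t != prev and t >= 0:
--             boundaries.add(i)
--         prev = t
--     # Add end boundaries
--     for i in range(len(char_map) - 1):
--         if char_map[i] >= 0 and (char_map[i + 1] != char_map[i]):
--             boundaries.add(i + 1)
--     if char_map and char_map[-1] >= 0:
--         boundaries.add(len(char_map))
--     return boundaries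
-- ===== SOURCE B (Python) =====
-- def _token_boundaries(char_map: list[int]) -> set[int]:
--     """Return set of character positions where token boundaries occur."""
--     # Run-length encode: one (start_position, value) entry per maximal run,
--     # terminated by a negative sentinel run at position len(char_map).
--     runs = []
--     for i, t in enumerate(char_map):
--         if not runs or runs[-1][1] != t:
--             runs.append((i, t))
--     runs.append((len(char_map), -1))
--     starts, ends = [], []
--     for (s, v), (s2, v2) in zip(runs, runs[1:]):
--         if v >= 0:
--             starts.append(s)
--             if v2 < 0:
--                 ends.append(s2)
--     return set(starts + ends)
-- ===== Notes on version B (the rewrite author's own statement) =====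
-- stated objective: alternative
-- what changed: B first run-length-encodes char_map into a list of (start,value) runs terminated by a negative sentinel run, then derives all boundaries from one pass over consecutive run pairs, instead of A's three per-character phases (prev-carrying start scan, end scan, final-position special case).
import Mathlib
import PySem

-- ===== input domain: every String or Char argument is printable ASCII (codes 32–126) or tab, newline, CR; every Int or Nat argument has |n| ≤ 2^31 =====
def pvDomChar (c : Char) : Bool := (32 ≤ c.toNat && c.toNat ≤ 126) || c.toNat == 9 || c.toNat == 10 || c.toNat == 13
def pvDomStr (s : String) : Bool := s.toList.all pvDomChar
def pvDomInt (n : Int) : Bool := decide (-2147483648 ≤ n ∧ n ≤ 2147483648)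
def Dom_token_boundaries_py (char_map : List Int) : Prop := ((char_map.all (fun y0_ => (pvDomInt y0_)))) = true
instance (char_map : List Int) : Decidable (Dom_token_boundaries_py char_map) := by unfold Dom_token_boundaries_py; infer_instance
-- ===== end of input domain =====

-- B run-length-encodes char_map into (start, value) runs with a negative sentinel run at the
-- end, then reads every boundary off one pass over consecutive run pairs — a different
-- decomposition of the same task, same asymptotic cost (objective: alternative).

-- ===== PORT A =====
-- shared indexing helper: Python's char_map[i]
def tbGet (c : List Int) (i : Int) : Int := PySem.List.pyGetD c i 0

def token_boundaries_py (char_map : List Int) : List Int :=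
  let p1 := (PySem.List.enumerate char_map 0).foldl
    (fun (st : List Int × Int) it =>
      (if it.2 ≠ st.2 ∧ 0 ≤ it.2 then PySem.Set.add st.1 it.1 else st.1, it.2))
    (PySem.Set.empty, -2)
  let n : Int := PySem.List.len char_map
  let b2 := (PySem.List.pyRange 0 (n - 1) 1).foldl
    (fun b i => if 0 ≤ tbGet char_map i ∧ tbGet char_map (i + 1) ≠ tbGet char_map i
                then PySem.Set.add b (i + 1) else b) p1.1
  if char_map ≠ [] ∧ 0 ≤ tbGet char_map (-1) then PySem.Set.add b2 n else b2

-- ===== PORT B =====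
-- the body of Source B's run-collecting loop: append (i, t) when runs is empty or its last value ≠ t
def tbRF (runs : List (Int × Int)) (it : Int × Int) : List (Int × Int) :=
  if runs.getLast?.all (fun p => p.2 != it.2) then runs ++ [it] else runs

-- the body of Source B's pair loop: collect run starts with value ≥ 0, and the next run's start
-- when the next value is negative
def tbPF (p : List Int × List Int) (q : (Int × Int) × (Int × Int)) : List Int × List Int :=
  if 0 ≤ q.1.2 then (p.1 ++ [q.1.1], if q.2.2 < 0 then p.2 ++ [q.2.1] else p.2) else p

def token_boundaries_py_alt (char_map : List Int) : List Int :=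
  let runs0 := (PySem.List.enumerate char_map 0).foldl tbRF []
  let runs := runs0 ++ [(PySem.List.len char_map, -1)]
  let se := (runs.zip runs.tail).foldl tbPF ([], [])
  PySem.Set.ofList (se.1 ++ se.2)

-- ===== PRECONDITION & SPEC =====
def Spec_token_boundaries_py (char_map : List Int) (out : List Int) : Prop := out = token_boundaries_py_alt char_map
instance (char_map : List Int) (out : List Int) : Decidable (Spec_token_boundaries_py char_map out) := by unfold Spec_token_boundaries_py; infer_instance

-- ===== CLAIM (what is proved, stated in full; the proofs are below) =====
def Claim_equal_token_boundaries_py : Prop := ∀ (char_map : List Int), Dom_token_boundaries_py char_map → Spec_token_boundaries_py char_map (token_boundaries_py char_map)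

-- ===== LEMMAS AND PROOFS =====

def tbPs (c : List Int) (i : Int) : Bool :=
  decide (0 ≤ tbGet c i ∧ (i = 0 ∨ tbGet c (i - 1) ≠ tbGet c i))

def tbS (c : List Int) : List Int :=
  (PySem.List.pyRange 0 (PySem.List.len c) 1).filter (tbPs c)

def tbM (c : List Int) : List Int :=
  ((PySem.List.pyRange 0 (PySem.List.len c - 1) 1).filter
    (fun i => decide (0 ≤ tbGet c i ∧ tbGet c (i + 1) < 0))).map (· + 1)

def tbT (c : List Int) : List Int :=
  if c ≠ [] ∧ 0 ≤ tbGet c (-1) then [PySem.List.len c] else []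

def startsRec (l : List Int) (k prev : Int) : List Int :=
  match l with
  | [] => []
  | t :: rest => (if t ≠ prev ∧ 0 ≤ t then [k] else []) ++ startsRec rest (k + 1) t

def runsRec (l : List Int) (k prev : Int) : List (Int × Int) :=
  match l with
  | [] => []
  | t :: rest => (if t ≠ prev then [(k, t)] else []) ++ runsRec rest (k + 1) t

def endsRec (l : List Int) (k prev : Int) : List Int :=
  match l with
  | [] => if 0 ≤ prev then [k] else []
  | t :: rest => (if 0 ≤ prev ∧ t < 0 then [k] else []) ++ endsRec rest (k + 1) t

theorem pass1_gen (l : List Int) : ∀ (k prev : Int) (s : List Int), (∀ x ∈ s, x < k) →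
    ((PySem.List.enumerate l k).foldl
      (fun (st : List Int × Int) it =>
        (if it.2 ≠ st.2 ∧ 0 ≤ it.2 then PySem.Set.add st.1 it.1 else st.1, it.2))
      (s, prev)).1 = s ++ startsRec l k prev := by
  induction l with
  | nil => intro k prev s _; simp [PySem.List.enumerate_nil, startsRec]
  | cons t rest ih =>
    intro k prev s hs
    rw [PySem.List.enumerate_cons]
    simp only [List.foldl_cons]
    by_cases h : t ≠ prev ∧ 0 ≤ t
    · have hk : k ∉ s := fun hm => absurd (hs k hm) (by omega)
      rw [if_pos h]
      rw [PySem.Set.add_of_not_mem hk]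
      have hb : ∀ x ∈ s ++ [k], x < k + 1 := by
        intro x hx
        rcases List.mem_append.1 hx with h' | h'
        · have := hs x h'; omega
        · have := List.mem_singleton.1 h'; omega
      rw [ih (k+1) t (s ++ [k]) hb]
      simp [startsRec, h, List.append_assoc]
    · rw [if_neg h]
      rw [ih (k+1) t s (fun x hx => lt_trans (hs x hx) (by omega))]
      simp [startsRec, h]

theorem startsRec_eq (c : List Int) : ∀ (j m : Nat), m + j = c.length →
    startsRec (c.drop m) (m : Int) (if m = 0 then -2 else tbGet c ((m : Int) - 1))
      = (PySem.List.pyRange (m : Int) (c.length : Int) 1).filter (tbPs c) := by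
  intro j
  induction j with
  | zero =>
    intro m hm
    rw [List.drop_of_length_le (by omega)]
    rw [PySem.List.pyRange_one_eq_nil (by omega)]
    rfl
  | succ j ih =>
    intro m hm
    have hlt : m < c.length := by omega
    rw [List.drop_eq_getElem_cons hlt]
    rw [PySem.List.pyRange_one_cons (by exact_mod_cast hlt)]
    rw [List.filter_cons]
    show (if (getElem c m hlt) ≠ (if m = 0 then -2 else tbGet c ((m : Int) - 1)) ∧ 0 ≤ (getElem c m hlt) then [(m:Int)] else [])
        ++ startsRec (c.drop (m+1)) ((m:Int) + 1) (getElem c m hlt) = _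
    have hget : tbGet c (m : Int) = (getElem c m hlt) := by
      simp [tbGet, PySem.List.pyGetD_natCast, List.getD, hlt]
    have hcond : ((getElem c m hlt) ≠ (if m = 0 then -2 else tbGet c ((m : Int) - 1)) ∧ 0 ≤ (getElem c m hlt)) ↔ tbPs c m = true := by
      by_cases hm0 : m = 0
      · subst hm0
        simp only [Nat.cast_zero] at hget
        simp [tbPs, hget]
        omega
      · rw [if_neg hm0]
        simp only [tbPs, decide_eq_true_eq, hget]
        omega
    have hrec : startsRec (c.drop (m+1)) ((m:Int) + 1) (getElem c m hlt)
        = (PySem.List.pyRange ((m:Int) + 1) (c.length : Int) 1).filter (tbPs c) := by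
      have := ih (m+1) (by omega)
      have hprev : (if m + 1 = 0 then (-2 : Int) else tbGet c (((m+1 : Nat) : Int) - 1)) = (getElem c m hlt) := by
        rw [if_neg (by omega)]
        have : ((m+1 : Nat) : Int) - 1 = (m : Int) := by omega
        rw [this, hget]
      rw [hprev] at this
      rw [show ((m:Int) + 1) = ((m+1 : Nat) : Int) by push_cast; ring]
      exact this
    rw [hrec]
    by_cases hp : tbPs c (m : Int) = true
    · rw [if_pos (hcond.mpr hp), hp]; rfl
    · rw [if_neg (fun hcc => hp (hcond.mp hcc))]
      rw [Bool.eq_false_iff.mpr hp]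
      simp

theorem mem_tbS (c : List Int) (x : Int) :
    x ∈ tbS c ↔ (0 ≤ x ∧ x < (c.length : Int)) ∧ tbPs c x = true := by
  simp [tbS, List.mem_filter, PySem.List.mem_pyRange_one, PySem.List.len_eq, and_assoc]

theorem nodup_tbS (c : List Int) : (tbS c).Nodup :=
  (PySem.List.nodup_pyRange_one 0 (PySem.List.len c)).filter _

theorem pass1_eq (c : List Int) :
    startsRec c 0 (-2) = tbS c := by
  have h := startsRec_eq c c.length 0 (by omega)
  simpa [tbS, PySem.List.len_eq] using h

theorem pass2_eq (c : List Int) :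
    (PySem.List.pyRange 0 ((PySem.List.len c) - 1) 1).foldl
      (fun b i => if 0 ≤ tbGet c i ∧ tbGet c (i + 1) ≠ tbGet c i
                  then PySem.Set.add b (i + 1) else b) (tbS c)
      = tbS c ++ tbM c := by
  rw [PySem.List.foldl_ite_eq_foldl_filter]
  rw [← PySem.Set.update_map_eq_foldl_add]
  rw [PySem.Set.update_eq_append_filter]
  congr 1
  have hnodup : (((PySem.List.pyRange 0 (PySem.List.len c - 1) 1).filter
      (fun x => decide (0 ≤ tbGet c x ∧ tbGet c (x + 1) ≠ tbGet c x))).map (· + 1)).Nodup := by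
    refine List.Nodup.map (fun a b h => by omega) ?_
    exact (PySem.List.nodup_pyRange_one _ _).filter _
  rw [PySem.Set.ofList_eq_self_of_nodup _ hnodup]
  rw [List.filter_map, tbM]
  congr 1
  rw [List.filter_filter]
  apply List.filter_congr
  intro i hi
  have hib : 0 ≤ i ∧ i < PySem.List.len c - 1 := (PySem.List.mem_pyRange_one).1 hi
  simp only [PySem.List.len_eq] at hib
  have hidx : i + 1 - 1 = i := by ring
  have hmemiff : PySem.Set.contains (tbS c) (i + 1) = true ↔
      ((0 ≤ i + 1 ∧ i + 1 < (c.length : Int)) ∧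
        (0 ≤ tbGet c (i + 1) ∧ (i + 1 = 0 ∨ tbGet c i ≠ tbGet c (i + 1)))) := by
    rw [PySem.Set.contains_iff, mem_tbS, tbPs, decide_eq_true_eq, hidx]
  simp only [Function.comp_apply]
  cases hcb : PySem.Set.contains (tbS c) (i + 1) with
  | false =>
    have hnot : ¬ ((0 ≤ i + 1 ∧ i + 1 < (c.length : Int)) ∧
        (0 ≤ tbGet c (i + 1) ∧ (i + 1 = 0 ∨ tbGet c i ≠ tbGet c (i + 1)))) := by
      intro h
      rw [hmemiff.mpr h] at hcb
      exact Bool.noConfusion hcb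
    simp only [Bool.not_false, Bool.true_and, decide_eq_decide]
    omega
  | true =>
    have hmem := hmemiff.mp hcb
    simp only [Bool.not_true, Bool.false_and]
    symm
    simp only [decide_eq_false_iff_not]
    omega

theorem portA_eq (c : List Int) : token_boundaries_py c = tbS c ++ tbM c ++ tbT c := by
  show (if c ≠ [] ∧ 0 ≤ tbGet c (-1)
      then PySem.Set.add ((PySem.List.pyRange 0 (PySem.List.len c - 1) 1).foldl
        (fun b i => if 0 ≤ tbGet c i ∧ tbGet c (i + 1) ≠ tbGet c i
                    then PySem.Set.add b (i + 1) else b)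
        ((PySem.List.enumerate c 0).foldl
          (fun (st : List Int × Int) it =>
            (if it.2 ≠ st.2 ∧ 0 ≤ it.2 then PySem.Set.add st.1 it.1 else st.1, it.2))
          (PySem.Set.empty, -2)).1) (PySem.List.len c)
      else _) = _
  rw [pass1_gen c 0 (-2) PySem.Set.empty (by intro x hx; cases hx)]
  rw [show (PySem.Set.empty ++ startsRec c 0 (-2) : List Int) = startsRec c 0 (-2) from List.nil_append _]
  rw [pass1_eq, pass2_eq]
  have hnot : (PySem.List.len c) ∉ tbS c ++ tbM c := by
    intro hmem
    rcases List.mem_append.1 hmem with h | h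
    · have := (mem_tbS c _).1 h
      simp only [PySem.List.len_eq] at this
      omega
    · rcases List.mem_map.1 h with ⟨i, hi, hie⟩
      have := (PySem.List.mem_pyRange_one).1 ((List.mem_filter.1 hi).1)
      simp only [PySem.List.len_eq] at this hie
      omega
  by_cases hc : c ≠ [] ∧ 0 ≤ tbGet c (-1)
  · rw [if_pos hc, PySem.Set.add_of_not_mem hnot]
    simp [tbT, hc]
  · rw [if_neg hc]
    simp [tbT, hc]

theorem tbGet_last (c : List Int) (h : c ≠ []) :
    tbGet c (PySem.List.len c - 1) = tbGet c (-1) := by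
  have hlen : 1 ≤ c.length := List.length_pos_iff.mpr h
  have hcast : (PySem.List.len c) - 1 = ((c.length - 1 : Nat) : Int) := by
    simp [PySem.List.len_eq]; omega
  rw [hcast]
  have h2 : tbGet c (-1) = c.getLast h := PySem.List.pyGetD_neg_one c 0 h
  rw [h2, List.getLast_eq_getElem]
  simp [tbGet, List.getD, List.getElem?_eq_getElem (show c.length - 1 < c.length by omega)]

-- B-side lemma 1: the run-collecting fold builds runsRec (once the first run exists)
theorem runsFold_gen (l : List Int) : ∀ (k : Int) (acc : List (Int × Int)) (p : Int × Int),
    (PySem.List.enumerate l k).foldl tbRF (acc ++ [p]) = acc ++ [p] ++ runsRec l k p.2 := by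
  induction l with
  | nil => intro k acc p; simp [PySem.List.enumerate_nil, runsRec]
  | cons t rest ih =>
    intro k acc p
    rw [PySem.List.enumerate_cons]
    simp only [List.foldl_cons]
    have hlast : (acc ++ [p]).getLast? = some p := by simp
    by_cases h : t ≠ p.2
    · have hstep : tbRF (acc ++ [p]) (k, t) = (acc ++ [p]) ++ [(k, t)] := by
        simp [tbRF, hlast, Ne.symm h]
      rw [hstep, show (acc ++ [p]) ++ [(k, t)] = (acc ++ [p]) ++ [(k, t)] from rfl]
      rw [ih (k + 1) (acc ++ [p]) (k, t)]
      simp [runsRec, h, List.append_assoc]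
    · have ht : t = p.2 := by omega
      have hstep : tbRF (acc ++ [p]) (k, t) = acc ++ [p] := by
        simp [tbRF, hlast, ht]
      rw [hstep, ih (k + 1) acc p]
      simp [runsRec, ht]

theorem tbRuns_eq (t : Int) (rest : List Int) :
    (PySem.List.enumerate (t :: rest) 0).foldl tbRF [] = (0, t) :: runsRec rest 1 t := by
  rw [PySem.List.enumerate_cons]
  simp only [List.foldl_cons]
  have hstep : tbRF [] (0, t) = [] ++ [((0 : Int), t)] := by simp [tbRF]
  rw [hstep, runsFold_gen rest (0 + 1) [] (0, t)]
  norm_num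

-- B-side lemma 2: the pair fold over a run chain collects the head start (if its value ≥ 0),
-- the remaining run starts, and the ends
theorem pairFold_gen (l : List Int) : ∀ (k prev s0 : Int) (sa ea : List Int),
    ((((s0, prev) :: (runsRec l k prev ++ [(k + (l.length : Int), -1)])).zip
        (runsRec l k prev ++ [(k + (l.length : Int), -1)])).foldl tbPF (sa, ea))
      = (sa ++ (if 0 ≤ prev then [s0] else []) ++ startsRec l k prev,
         ea ++ endsRec l k prev) := by
  induction l with
  | nil =>
    intro k prev s0 sa ea
    simp only [runsRec, List.length_nil, Nat.cast_zero, add_zero, List.nil_append,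
      List.zip_cons_cons, List.zip_nil_right, List.foldl_cons, List.foldl_nil]
    by_cases h : 0 ≤ prev
    · simp [tbPF, h, startsRec, endsRec]
    · simp [tbPF, h, startsRec, endsRec]
  | cons t rest ih =>
    intro k prev s0 sa ea
    have hlen : k + ((t :: rest).length : Int) = (k + 1) + (rest.length : Int) := by
      simp [List.length_cons]; push_cast; ring
    by_cases h : t ≠ prev
    · have hruns : runsRec (t :: rest) k prev = (k, t) :: runsRec rest (k + 1) t := by
        simp [runsRec, h]
      rw [hruns, hlen]
      simp only [List.cons_append, List.zip_cons_cons, List.foldl_cons]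
      rw [ih (k + 1) t k (tbPF (sa, ea) ((s0, prev), (k, t))).1 (tbPF (sa, ea) ((s0, prev), (k, t))).2]
      have hs : startsRec (t :: rest) k prev = (if 0 ≤ t then [k] else []) ++ startsRec rest (k + 1) t := by
        simp only [startsRec]
        congr 1
        by_cases h0 : 0 ≤ t <;> simp [h, h0]
      rw [hs]
      show _ = (sa ++ (if 0 ≤ prev then [s0] else []) ++ ((if 0 ≤ t then [k] else []) ++ startsRec rest (k + 1) t),
                ea ++ ((if 0 ≤ prev ∧ t < 0 then [k] else []) ++ endsRec rest (k + 1) t))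
      by_cases hp : 0 ≤ prev
      · by_cases htn : t < 0
        · simp [tbPF, hp, htn, List.append_assoc]
        · simp [tbPF, hp, htn, List.append_assoc]
      · simp [tbPF, hp, List.append_assoc]
    · rw [show prev = t from by omega]
      have hruns : runsRec (t :: rest) k t = runsRec rest (k + 1) t := by
        simp [runsRec]
      rw [hruns, hlen, ih (k + 1) t s0 sa ea]
      have hs : startsRec (t :: rest) k t = startsRec rest (k + 1) t := by
        simp [startsRec]
      have he : endsRec (t :: rest) k t = endsRec rest (k + 1) t := by
        have hno : ¬ (0 ≤ t ∧ t < 0) := by omega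
        simp [endsRec, hno]
      rw [hs, he]

-- B-side lemma 3: endsRec over the tail of c enumerates exactly the end boundaries
theorem endsRec_eq (c : List Int) : ∀ (j m : Nat), 1 ≤ m → m + j = c.length →
    endsRec (c.drop m) (m : Int) (tbGet c ((m : Int) - 1))
      = (PySem.List.pyRange (m : Int) (c.length : Int) 1).filter
          (fun p => decide (0 ≤ tbGet c (p - 1) ∧ tbGet c p < 0)) ++ tbT c := by
  intro j
  induction j with
  | zero =>
    intro m h1 hm
    have hne : c ≠ [] := by intro h; rw [h] at hm; simp at hm; omega
    rw [List.drop_of_length_le (by omega)]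
    rw [PySem.List.pyRange_one_eq_nil (by omega)]
    have hml : (m : Int) - 1 = PySem.List.len c - 1 := by
      simp [PySem.List.len_eq]; omega
    rw [hml, tbGet_last c hne]
    have hc : (m : Int) = PySem.List.len c := by simp [PySem.List.len_eq]; omega
    simp only [endsRec, tbT, hc]
    by_cases hg : 0 ≤ tbGet c (-1)
    · simp [hg, hne]
    · simp [hg]
  | succ j ih =>
    intro m h1 hm
    have hlt : m < c.length := by omega
    rw [List.drop_eq_getElem_cons hlt]
    rw [PySem.List.pyRange_one_cons (by exact_mod_cast hlt)]
    rw [List.filter_cons]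
    have hget : tbGet c (m : Int) = getElem c m hlt := by
      simp [tbGet, PySem.List.pyGetD_natCast, List.getD, hlt]
    have hrec : endsRec (c.drop (m + 1)) ((m : Int) + 1) (getElem c m hlt)
        = (PySem.List.pyRange ((m : Int) + 1) (c.length : Int) 1).filter
            (fun p => decide (0 ≤ tbGet c (p - 1) ∧ tbGet c p < 0)) ++ tbT c := by
      have := ih (m + 1) (by omega) (by omega)
      have hcast : ((m + 1 : Nat) : Int) = (m : Int) + 1 := by push_cast; ring
      rw [hcast] at this
      have hprev : (m : Int) + 1 - 1 = (m : Int) := by ring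
      rw [hprev, hget] at this
      exact this
    show (if 0 ≤ tbGet c ((m : Int) - 1) ∧ getElem c m hlt < 0 then [(m : Int)] else [])
        ++ endsRec (c.drop (m + 1)) ((m : Int) + 1) (getElem c m hlt) = _
    rw [hrec]
    by_cases hcond : 0 ≤ tbGet c ((m : Int) - 1) ∧ tbGet c (m : Int) < 0
    · rw [if_pos (by rw [← hget]; exact hcond)]
      rw [if_pos (by simpa using hcond)]
      simp
    · rw [if_neg (by rw [← hget]; exact hcond)]
      rw [if_neg (by simpa using hcond)]
      simp

-- the end boundaries over positions 1..n, reindexed, are tbM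
theorem ends_range_eq_tbM (c : List Int) :
    (PySem.List.pyRange 1 (PySem.List.len c) 1).filter
        (fun p => decide (0 ≤ tbGet c (p - 1) ∧ tbGet c p < 0)) = tbM c := by
  have hmap : PySem.List.pyRange 1 (PySem.List.len c) 1
      = (PySem.List.pyRange 0 (PySem.List.len c - 1) 1).map (· + 1) := by
    rw [PySem.List.pyRange_one, PySem.List.pyRange_one, List.map_map]
    have h0 : PySem.List.len c - 1 - 0 = PySem.List.len c - 1 := by ring
    rw [h0]
    apply List.map_congr_left
    intro k _
    simp
    omega
  rw [hmap, List.filter_map, tbM]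
  congr 1
  apply List.filter_congr
  intro i _
  have hidx : i + 1 - 1 = i := by ring
  simp [Function.comp_apply, hidx]

theorem mem_tbM (c : List Int) (x : Int) (h : x ∈ tbM c) :
    tbGet c x < 0 ∧ x < (c.length : Int) := by
  rcases List.mem_map.1 h with ⟨i, hi, hie⟩
  have hr := (PySem.List.mem_pyRange_one).1 (List.mem_filter.1 hi).1
  have hp := of_decide_eq_true (List.mem_filter.1 hi).2
  simp only [PySem.List.len_eq] at hr
  constructor
  · rw [← hie]; exact hp.2
  · omega

theorem portB_eq (c : List Int) : token_boundaries_py_alt c = tbS c ++ tbM c ++ tbT c := by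
  match c with
  | [] => decide
  | t :: rest =>
    simp only [token_boundaries_py_alt]
    rw [tbRuns_eq]
    have hlen : PySem.List.len (t :: rest) = 1 + (rest.length : Int) := by
      simp [PySem.List.len_eq]; ring
    rw [hlen]
    simp only [List.cons_append, List.tail_cons]
    rw [pairFold_gen rest 1 t 0 [] []]
    show PySem.Set.ofList (((if 0 ≤ t then [(0 : Int)] else []) ++ startsRec rest 1 t)
        ++ endsRec rest 1 t) = _
    -- starts part
    have hstarts : (if 0 ≤ t then [(0 : Int)] else []) ++ startsRec rest 1 t = tbS (t :: rest) := by
      rw [← pass1_eq]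
      simp only [startsRec]
      congr 1
      by_cases h0 : 0 ≤ t
      · rw [if_pos h0, if_pos (by constructor; omega; exact h0)]
      · rw [if_neg h0, if_neg (by intro hh; exact h0 hh.2)]
    -- ends part
    have hget0 : tbGet (t :: rest) ((1 : Int) - 1) = t := by
      norm_num [tbGet, PySem.List.pyGetD]
    have hends : endsRec rest 1 t = tbM (t :: rest) ++ tbT (t :: rest) := by
      have := endsRec_eq (t :: rest) rest.length 1 (by omega) (by simp; omega)
      rw [show ((1 : Nat) : Int) = (1 : Int) by norm_num] at this
      rw [hget0] at this
      rw [show (t :: rest).drop 1 = rest from rfl] at this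
      rw [this]
      rw [show ((t :: rest).length : Int) = PySem.List.len (t :: rest) from (PySem.List.len_eq _).symm]
      rw [ends_range_eq_tbM]
    rw [hstarts, hends]
    -- dedup is the identity: the three blocks are nodup and pairwise disjoint
    have hnodupM : (tbM (t :: rest)).Nodup := by
      refine List.Nodup.map (fun a b h => by omega) ?_
      exact (PySem.List.nodup_pyRange_one _ _).filter _
    have hnodupT : (tbT (t :: rest)).Nodup := by
      unfold tbT; split_ifs <;> simp
    have hdisjST : ∀ x ∈ tbS (t :: rest), x ∉ tbM (t :: rest) ++ tbT (t :: rest) := by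
      intro x hx hmem
      have hS := (mem_tbS _ _).1 hx
      have hSv : 0 ≤ tbGet (t :: rest) x := (of_decide_eq_true hS.2).1
      rcases List.mem_append.1 hmem with h | h
      · have := mem_tbM _ _ h; omega
      · unfold tbT at h
        split_ifs at h with hc
        · have hx2 := List.mem_singleton.1 h
          simp only [PySem.List.len_eq] at hx2
          have := hS.1
          omega
        · cases h
    have hdisjMT : ∀ x ∈ tbM (t :: rest), x ∉ tbT (t :: rest) := by
      intro x hx hmem
      have := mem_tbM _ _ hx
      unfold tbT at hmem
      split_ifs at hmem with hc
      · have hx2 := List.mem_singleton.1 hmem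
        simp only [PySem.List.len_eq] at hx2
        omega
      · cases hmem
    have hnodup : (tbS (t :: rest) ++ (tbM (t :: rest) ++ tbT (t :: rest))).Nodup := by
      rw [List.nodup_append]
      refine ⟨nodup_tbS _, ?_, ?_⟩
      · rw [List.nodup_append]
        exact ⟨hnodupM, hnodupT, by intro a ha b hb hab; exact hdisjMT a ha (hab ▸ hb)⟩
      · intro a ha b hb hab
        exact hdisjST a ha (hab ▸ hb)
    rw [PySem.Set.ofList_eq_self_of_nodup _ hnodup]
    rw [List.append_assoc]

-- ===== VERDICT (by name: the statement is the Claim_ definition above) =====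
theorem token_boundaries_py_spec : Claim_equal_token_boundaries_py := by
  intro c _
  unfold Spec_token_boundaries_py
  rw [portA_eq, portB_eq]
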